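-- pv_equiv track=rewrite | github.com/HBNetwork/pds-api-client | betapp/betapp/greyhound/services.py | calc_points_recovery
-- ===== SOURCE A (Python) =====
-- def calc_points_recovery(recovery):
--     points = 0
--     for data in recovery:
--         if data == 'up':
--             points += 2
--         elif data == 'down':
--             points -= 2
--         else:
--             points += 1
--
--     return points
-- ===== SOURCE B (Python) =====
-- from collections import Counter
--
-- def calc_points_recovery(recovery):
--     c = Counter(recovery)
--     total = sum(c.values())
--     return total + c['up'] - 3 * c['down']
-- ===== Notes on version B (the rewrite author's own statement) =====
-- stated objective: alternative
-- what changed: B aggregates labels into a Counter once and returns a closed-form formula len + count('up') - 3*count('down') instead of scanning with per-element if/elif branching.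
import Mathlib
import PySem

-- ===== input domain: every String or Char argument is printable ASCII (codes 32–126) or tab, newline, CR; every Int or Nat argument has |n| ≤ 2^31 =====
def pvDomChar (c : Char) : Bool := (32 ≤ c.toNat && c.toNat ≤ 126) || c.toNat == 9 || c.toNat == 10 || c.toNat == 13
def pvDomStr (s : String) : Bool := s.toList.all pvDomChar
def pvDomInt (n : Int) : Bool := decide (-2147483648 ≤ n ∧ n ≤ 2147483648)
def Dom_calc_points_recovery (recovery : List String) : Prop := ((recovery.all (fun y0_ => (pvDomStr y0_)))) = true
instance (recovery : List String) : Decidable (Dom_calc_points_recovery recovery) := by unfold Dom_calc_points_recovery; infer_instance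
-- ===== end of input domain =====

-- B replaces A's per-element if/elif scan by a Counter aggregation plus a closed-form formula on the counts (alternative decomposition, same cost).
-- ===== PORT A =====
def calc_points_recovery (recovery : List String) : Int :=
  recovery.foldl (fun points data =>
    if data == "up" then points + 2
    else if data == "down" then points - 2
    else points + 1) 0

-- ===== PORT B =====
-- B: count labels once (Counter), then a closed-form formula on the counts
def calc_points_recovery_alt (recovery : List String) : Int :=
  let c := PySem.Dict.counter recovery
  let total : Int := (c.values).foldl (· + ·) 0
  total + c.getD "up" 0 - 3 * c.getD "down" 0

-- ===== PRECONDITION & SPEC =====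
def Spec_calc_points_recovery (recovery : List String) (out : Int) : Prop := out = calc_points_recovery_alt recovery
instance (recovery : List String) (out : Int) : Decidable (Spec_calc_points_recovery recovery out) := by unfold Spec_calc_points_recovery; infer_instance

-- ===== CLAIM (what is proved, stated in full; the proofs are below) =====
def Claim_equal_calc_points_recovery : Prop := ∀ (recovery : List String), Dom_calc_points_recovery recovery → Spec_calc_points_recovery recovery (calc_points_recovery recovery)

-- ===== LEMMAS AND PROOFS =====

-- A's scan-and-branch loop equals the closed form len + count "up" - 3 * count "down"
theorem calc_points_A_closed (xs : List String) (a : Int) :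
    xs.foldl (fun points data =>
      if data == "up" then points + 2
      else if data == "down" then points - 2
      else points + 1) a
      = a + xs.length + xs.count "up" - 3 * xs.count "down" := by
  induction xs generalizing a with
  | nil => simp
  | cons x xs ih =>
    simp only [List.foldl_cons, List.count_cons, ih]
    by_cases h1 : x = "up"
    · simp [h1]; ring
    · by_cases h2 : x = "down"
      · simp [h2]; ring
      · simp [h1, h2]; ring

-- the Counter's values list is the counts of the distinct elements
theorem counter_values_eq (xs : List String) :
    (PySem.Dict.counter xs).values
      = (PySem.Set.ofList xs).map (fun k => (xs.count k : Int)) := by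
  have h : (PySem.Dict.counter xs).values = (PySem.Dict.counter xs).items.map Prod.snd := by
    simp [PySem.Dict.values]
  rw [h, PySem.Dict.items_counter, List.map_map]
  rfl

-- summing the counts of the distinct elements recovers the length
theorem sum_counter_values (xs : List String) :
    (PySem.Dict.counter xs).values.foldl (· + ·) 0 = (xs.length : Int) := by
  rw [counter_values_eq, ← List.sum_eq_foldl]
  have hperm : List.Perm (PySem.Set.ofList xs) xs.dedup := by
    refine (List.perm_ext_iff_of_nodup (PySem.Set.nodup_ofList xs) xs.nodup_dedup).mpr ?_
    intro y
    rw [PySem.Set.mem_ofList, List.mem_dedup]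
  rw [List.Perm.sum_eq (hperm.map _)]
  have := List.sum_map_count_dedup_eq_length xs
  calc (xs.dedup.map (fun k => (xs.count k : Int))).sum
      = ((xs.dedup.map (fun k => xs.count k)).sum : Int) := by
        push_cast [List.map_map, Function.comp]; rfl
    _ = (xs.length : Int) := by rw [this]

-- ===== VERDICT (by name: the statement is the Claim_ definition above) =====
theorem calc_points_recovery_spec : Claim_equal_calc_points_recovery := by
  intro recovery _
  unfold Spec_calc_points_recovery calc_points_recovery calc_points_recovery_alt
  rw [calc_points_A_closed]
  simp only [sum_counter_values, PySem.Dict.getD_counter]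
  ring
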